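-- pv_equiv track=rewrite | github.com/MaaTT2000/desenvolvimento-cortexv2 | app.py | formatar_cortes_agrupados
-- ===== SOURCE A (Python) =====
-- def formatar_cortes_agrupados(cortes):
--     """Agrupa cortes iguais e retorna uma string formatada."""
--     contagem = {}
--     for valor in cortes:
--         contagem[valor] = contagem.get(valor, 0) + 1
--
--     # Ordena pela largura da peça, do maior para o menor
--     agrupados = []
--     for valor, qtd in sorted(contagem.items(), key=lambda item: item[0], reverse=True):
--         agrupados.append(f"{valor}mm #{qtd}")
--     return "  //  ".join(agrupados)
-- ===== SOURCE B (Python) =====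
-- def formatar_cortes_agrupados(cortes):
--     """Agrupa cortes iguais e retorna uma string formatada."""
--     ordenados = sorted(cortes, reverse=True)
--     partes = []
--     i = 0
--     n = len(ordenados)
--     while i < n:
--         v = ordenados[i]
--         j = i + 1
--         while j < n and ordenados[j] == v:
--             j += 1
--         partes.append(f"{v}mm #{j - i}")
--         i = j
--     return "  //  ".join(partes)
-- ===== Notes on version B (the rewrite author's own statement) =====
-- stated objective: alternative
-- what changed: Replaces the counter-dict-then-sort-items strategy with sort-then-scan: sort the list once descending and walk it grouping adjacent equal runs, formatting each run's value and length.
import Mathlib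
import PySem

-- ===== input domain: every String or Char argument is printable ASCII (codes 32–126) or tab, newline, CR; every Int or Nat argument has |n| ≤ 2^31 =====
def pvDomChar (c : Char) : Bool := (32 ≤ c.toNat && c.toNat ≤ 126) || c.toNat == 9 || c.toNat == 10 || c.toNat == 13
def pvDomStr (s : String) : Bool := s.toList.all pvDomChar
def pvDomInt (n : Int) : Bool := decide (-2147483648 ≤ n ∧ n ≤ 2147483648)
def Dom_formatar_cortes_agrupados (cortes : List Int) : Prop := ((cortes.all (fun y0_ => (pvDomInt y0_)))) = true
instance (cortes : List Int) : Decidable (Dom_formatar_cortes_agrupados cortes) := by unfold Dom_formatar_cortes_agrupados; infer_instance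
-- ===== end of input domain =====

-- B replaces A's counter-dict-then-sort-items strategy by sort-then-scan:
-- sort once descending and group adjacent equal runs (alternative algorithm; same result).

-- ===== PORT A =====
-- literal transliteration: build the count dict, sort its items by key reverse,
-- append formatted strings, join with "  //  "
def formatar_cortes_agrupados (cortes : List Int) : String :=
  let contagem := cortes.foldl (fun d valor => d.insert valor (d.getD valor 0 + 1)) PySem.Dict.empty
  let agrupados := (PySem.List.sorted contagem.items (fun item => item.1) true).foldl
      (fun acc p => acc ++ [PySem.Int.toStr p.1 ++ "mm #" ++ PySem.Int.toStr p.2]) []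
  PySem.Str.join "  //  " agrupados

-- ===== PORT B =====
-- the outer while loop of Source B: recursion over the remaining suffix of the sorted
-- list; the inner while loop that advances j past the equal run is takeWhile/dropWhile
def pvLoop (vals : List Int) : List String :=
  match vals with
  | [] => []
  | v :: t =>
      (PySem.Int.toStr v ++ "mm #" ++
        PySem.Int.toStr ((1 + (t.takeWhile (fun x => x == v)).length : Nat) : Int))
        :: pvLoop (t.dropWhile (fun x => x == v))
termination_by vals.length
decreasing_by
  simp only [List.length_cons]
  exact Nat.lt_succ_of_le (List.length_dropWhile_le _ _)

def formatar_cortes_agrupados_alt (cortes : List Int) : String :=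
  PySem.Str.join "  //  " (pvLoop (PySem.List.sorted cortes (fun v => v) true))

-- ===== PRECONDITION & SPEC =====
def Spec_formatar_cortes_agrupados (cortes : List Int) (out : String) : Prop := out = formatar_cortes_agrupados_alt cortes
instance (cortes : List Int) (out : String) : Decidable (Spec_formatar_cortes_agrupados cortes out) := by unfold Spec_formatar_cortes_agrupados; infer_instance

-- ===== CLAIM (what is proved, stated in full; the proofs are below) =====
def Claim_equal_formatar_cortes_agrupados : Prop := ∀ (cortes : List Int), Dom_formatar_cortes_agrupados cortes → Spec_formatar_cortes_agrupados cortes (formatar_cortes_agrupados cortes)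

-- ===== LEMMAS AND PROOFS =====

-- Set.add on a cons cell, element distinct from the head
theorem pv_add_cons (s : List Int) (v x : Int) (hx : x ≠ v) :
    PySem.Set.add (v :: s) x = v :: PySem.Set.add s x := by
  by_cases hmem : x ∈ s <;>
    simp [PySem.Set.add, PySem.Set.contains, List.mem_cons, hx, hmem]

theorem pv_foldl_add_cons (l : List Int) (v : Int) (s : List Int) (h : v ∉ l) :
    l.foldl PySem.Set.add (v :: s) = v :: l.foldl PySem.Set.add s := by
  induction l generalizing s with
  | nil => rfl
  | cons x t ih =>
      simp only [List.mem_cons, not_or] at h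
      simp only [List.foldl_cons, pv_add_cons s v x (fun he => h.1 he.symm)]
      exact ih _ h.2

theorem pv_foldl_add_all_eq (l : List Int) (v : Int) (h : ∀ x ∈ l, x = v) :
    l.foldl PySem.Set.add [v] = [v] := by
  induction l with
  | nil => rfl
  | cons x t ih =>
      have hx : x = v := h x (List.mem_cons_self)
      have hone : PySem.Set.add [v] x = [v] := by
        simp [PySem.Set.add, PySem.Set.contains, hx]
      simp only [List.foldl_cons, hone]
      exact ih (fun y hy => h y (List.mem_cons_of_mem _ hy))

theorem pv_foldl_add_sublist (l s : List Int) :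
    (l.foldl PySem.Set.add s).Sublist (s ++ l) := by
  induction l generalizing s with
  | nil => simp
  | cons x t ih =>
      have h1 : (PySem.Set.add s x).Sublist (s ++ [x]) := by
        by_cases hmem : x ∈ s <;> simp [PySem.Set.add, PySem.Set.contains, hmem]
      have h2 : ((x :: t).foldl PySem.Set.add s).Sublist (PySem.Set.add s x ++ t) := ih _
      have h3 : (PySem.Set.add s x ++ t).Sublist ((s ++ [x]) ++ t) := h1.append_right t
      have h4 : (s ++ [x]) ++ t = s ++ x :: t := by simp
      exact h2.trans (h4 ▸ h3)

theorem pv_dedup_sublist (l : List Int) : (PySem.List.dedup l).Sublist l := by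
  rw [PySem.List.dedup_eq_ofList]
  simpa using pv_foldl_add_sublist l []

-- the grouping lemma: on a descending-sorted list, the run scan produces one
-- formatted entry per distinct value, carrying that value's total count
theorem pvLoop_sorted (l : List Int)
    (h : List.Pairwise (fun a b : Int => b ≤ a) l) :
    pvLoop l = (PySem.List.dedup l).map
      (fun k => PySem.Int.toStr k ++ "mm #" ++ PySem.Int.toStr (l.count k : Int)) := by
  induction l using pvLoop.induct with
  | case1 => simp [pvLoop, PySem.List.dedup_eq_ofList]
  | case2 v t ih =>
      have hpc := List.pairwise_cons.mp h
      have h1 : ∀ x ∈ t, x ≤ v := hpc.1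
      have ht : List.Pairwise (fun a b : Int => b ≤ a) t := hpc.2
      have htw : ∀ x ∈ t.takeWhile (fun x => x == v), x = v := fun x hx => by
        simpa using List.mem_takeWhile_imp hx
      have hdw_sorted : List.Pairwise (fun a b : Int => b ≤ a)
          (t.dropWhile (fun x => x == v)) :=
        List.Pairwise.sublist (List.dropWhile_sublist _) ht
      have hdw_lt : ∀ x ∈ t.dropWhile (fun x => x == v), x < v := by
        cases hdd : t.dropWhile (fun x => x == v) with
        | nil => intro x hx; simp at hx
        | cons d dw' =>
            have hhead := List.head?_dropWhile_not (fun x => x == v) t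
            rw [hdd] at hhead
            have hdne : d ≠ v := by simpa using hhead
            have hdmem : d ∈ t :=
              (List.dropWhile_sublist _).mem (hdd ▸ List.mem_cons_self)
            have hdlt : d < v := lt_of_le_of_ne (h1 d hdmem) hdne
            rw [hdd] at hdw_sorted
            intro x hx
            rcases List.mem_cons.mp hx with rfl | hx'
            · exact hdlt
            · exact lt_of_le_of_lt ((List.pairwise_cons.mp hdw_sorted).1 x hx') hdlt
      have hvdw : v ∉ t.dropWhile (fun x => x == v) :=
        fun hv => lt_irrefl v (hdw_lt v hv)
      have hsplit : t.takeWhile (fun x => x == v) ++ t.dropWhile (fun x => x == v) = t :=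
        List.takeWhile_append_dropWhile
      have hcount_tw : (t.takeWhile (fun x => x == v)).count v
          = (t.takeWhile (fun x => x == v)).length :=
        List.count_eq_length.mpr (fun b hb => by simp [htw b hb])
      have hcount_dw : (t.dropWhile (fun x => x == v)).count v = 0 :=
        List.count_eq_zero.mpr hvdw
      have hcount_v : (v :: t).count v = 1 + (t.takeWhile (fun x => x == v)).length := by
        conv_lhs => rw [← hsplit]
        rw [show (v :: (t.takeWhile (fun x => x == v) ++ t.dropWhile (fun x => x == v)))
              = [v] ++ t.takeWhile (fun x => x == v) ++ t.dropWhile (fun x => x == v) by simp]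
        rw [List.count_append, List.count_append, hcount_tw, hcount_dw]
        simp
      have hdedup : PySem.List.dedup (v :: t)
          = v :: PySem.List.dedup (t.dropWhile (fun x => x == v)) := by
        rw [PySem.List.dedup_eq_ofList, PySem.List.dedup_eq_ofList]
        show (v :: t).foldl PySem.Set.add []
            = v :: (t.dropWhile (fun x => x == v)).foldl PySem.Set.add []
        conv_lhs => rw [← hsplit]
        rw [List.foldl_cons, show PySem.Set.add [] v = [v] from rfl, List.foldl_append,
          pv_foldl_add_all_eq _ v htw, pv_foldl_add_cons _ v [] hvdw]
      rw [pvLoop, hdedup, List.map_cons]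
      congr 1
      · congr 2
        rw [hcount_v]
      · rw [ih hdw_sorted]
        apply List.map_congr_left
        intro k hk
        have hkdw : k ∈ t.dropWhile (fun x => x == v) := (pv_dedup_sublist _).mem hk
        have hkne : k ≠ v := ne_of_lt (hdw_lt k hkdw)
        have hktw : (t.takeWhile (fun x => x == v)).count k = 0 :=
          List.count_eq_zero.mpr (fun hkt => hkne (htw k hkt))
        have hkc : (v :: t).count k = (t.dropWhile (fun x => x == v)).count k := by
          conv_lhs => rw [← hsplit]
          rw [List.count_cons, List.count_append, hktw]
          simp
          exact fun he => hkne he.symm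
        rw [hkc]

-- sorted(xs-distinct, reverse=True) is strictly decreasing
theorem sorted_ofList_rev_pairwise_gt (xs : List Int) :
    List.Pairwise (fun a b : Int => b < a)
      (PySem.List.sorted (PySem.Set.ofList xs) (fun v => v) true) := by
  have hle := PySem.List.sorted_pairwise_rev (PySem.Set.ofList xs) (fun v => v)
  have hnd : (PySem.List.sorted (PySem.Set.ofList xs) (fun v => v) true).Nodup :=
    ((PySem.List.sorted_perm (PySem.Set.ofList xs) (fun v => v) true).symm).nodup
      (PySem.Set.nodup_ofList xs)
  exact (hle.and hnd).imp (fun h => lt_of_le_of_ne h.1 (Ne.symm h.2))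

-- sorting the counter's items by key, reverse, is sorting the distinct values
theorem sorted_items_counter (xs : List Int) :
    PySem.List.sorted (PySem.Dict.counter xs).items (fun item => item.1) true
      = (PySem.List.sorted (PySem.Set.ofList xs) (fun v => v) true).map
          (fun k => (k, (List.count k xs : Int))) := by
  apply PySem.List.sorted_rev_eq_of_perm_of_pairwise_gt
  · rw [PySem.Dict.items_counter]
    exact (PySem.List.sorted_perm (PySem.Set.ofList xs) (fun v => v) true).map _
  · rw [List.pairwise_map]
    exact sorted_ofList_rev_pairwise_gt xs

-- dedup of the descending sort of xs IS the descending sort of the distinct values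
theorem dedup_sorted_rev (xs : List Int) :
    PySem.List.dedup (PySem.List.sorted xs (fun v => v) true)
      = PySem.List.sorted (PySem.Set.ofList xs) (fun v => v) true := by
  have hnd : (PySem.List.dedup (PySem.List.sorted xs (fun v => v) true)).Nodup :=
    PySem.List.nodup_dedup _
  have hperm : (PySem.List.dedup (PySem.List.sorted xs (fun v => v) true)).Perm
      (PySem.Set.ofList xs) := by
    rw [List.perm_ext_iff_of_nodup hnd (PySem.Set.nodup_ofList xs)]
    intro a
    rw [PySem.List.mem_dedup, PySem.Set.mem_ofList, PySem.List.mem_sorted]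
  refine (PySem.List.sorted_rev_eq_of_perm_of_pairwise_gt _ _ _ hperm ?_).symm
  have hle : List.Pairwise (fun a b : Int => b ≤ a)
      (PySem.List.dedup (PySem.List.sorted xs (fun v => v) true)) :=
    List.Pairwise.sublist (pv_dedup_sublist _)
      (PySem.List.sorted_pairwise_rev xs (fun v => v))
  exact (hle.and hnd).imp (fun h => lt_of_le_of_ne h.1 (Ne.symm h.2))

-- ===== VERDICT (by name: the statement is the Claim_ definition above) =====
theorem formatar_cortes_agrupados_spec : Claim_equal_formatar_cortes_agrupados := by
  intro cortes _
  show _ = _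
  simp only [formatar_cortes_agrupados, formatar_cortes_agrupados_alt,
    PySem.Dict.foldl_insert_getD_add_one_eq_counter]
  rw [sorted_items_counter, PySem.List.foldl_append_singleton_eq_map, List.nil_append,
    List.map_map]
  rw [pvLoop_sorted _ (PySem.List.sorted_pairwise_rev cortes (fun v => v)),
    dedup_sorted_rev]
  apply congrArg
  apply List.map_congr_left
  intro k _
  have hc : (PySem.List.sorted cortes (fun v => v) true).count k = cortes.count k :=
    (PySem.List.sorted_perm cortes (fun v => v) true).count_eq k
  simp [Function.comp, hc]
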